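-- pv_equiv track=rewrite | github.com/Justin-Killam/Python | CustomLib/PRNG32.py | PRNG32
-- ===== SOURCE A (Python) =====
-- def PRNG32(CurVal,Seed=0x2451AE31,Poly=0x80000062):
--     feedback=0
--     if(CurVal==0):
--         CurVal=Seed
--     else:
--         for i in range(32):
--             if(((Poly>>i)&1)==1):
--                 feedback=feedback^((CurVal>>i)&1)
--         CurVal=(CurVal<<1)|feedback
--     return CurVal
-- ===== SOURCE B (Python) =====
-- def PRNG32(CurVal, Seed=0x2451AE31, Poly=0x80000062):
--     if CurVal == 0:
--         return Seed
--     x = (CurVal & Poly) & 0xFFFFFFFF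
--     x ^= x >> 16
--     x ^= x >> 8
--     x ^= x >> 4
--     x ^= x >> 2
--     x ^= x >> 1
--     return (CurVal << 1) | (x & 1)
-- ===== Notes on version B (the rewrite author's own statement) =====
-- stated objective: faster
-- what changed: replaced the 32-iteration per-bit parity loop over Poly's set bits with masking CurVal & Poly to 32 bits and a 5-step xor-shift parity fold
import Mathlib
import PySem

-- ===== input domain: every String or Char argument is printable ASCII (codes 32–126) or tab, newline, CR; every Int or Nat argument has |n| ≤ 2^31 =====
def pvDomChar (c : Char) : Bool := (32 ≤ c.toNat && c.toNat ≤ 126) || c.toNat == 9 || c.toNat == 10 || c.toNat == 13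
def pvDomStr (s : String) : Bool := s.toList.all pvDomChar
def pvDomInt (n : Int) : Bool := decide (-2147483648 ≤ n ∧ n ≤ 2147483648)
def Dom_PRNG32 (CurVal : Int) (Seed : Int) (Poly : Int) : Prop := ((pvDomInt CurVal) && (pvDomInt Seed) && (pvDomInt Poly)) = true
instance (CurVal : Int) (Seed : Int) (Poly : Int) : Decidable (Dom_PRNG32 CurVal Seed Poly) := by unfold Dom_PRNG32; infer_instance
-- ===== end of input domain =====

-- B replaces A's 32-iteration per-bit parity loop by masking CurVal & Poly to 32 bits and a 5-step
-- xor-shift parity fold (objective: faster by a constant factor — fewer, word-level operations per call).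

-- ===== PORT A =====
def PRNG32 (CurVal : Int) (Seed : Int) (Poly : Int) : Int :=
  let feedback : Int := 0
  if CurVal = 0 then
    Seed
  else
    let feedback := (PySem.List.pyRange 0 32 1).foldl
      (fun f i =>
        if PySem.Int.band (Poly >>> i.toNat) 1 = 1 then
          PySem.Int.bxor f (PySem.Int.band (CurVal >>> i.toNat) 1)
        else f) feedback
    PySem.Int.bor (CurVal <<< 1) feedback

-- ===== PORT B =====
def PRNG32_alt (CurVal : Int) (Seed : Int) (Poly : Int) : Int :=
  if CurVal = 0 then
    Seed
  else
    let x0 := PySem.Int.band (PySem.Int.band CurVal Poly) 4294967295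
    let x1 := PySem.Int.bxor x0 (x0 >>> 16)
    let x2 := PySem.Int.bxor x1 (x1 >>> 8)
    let x3 := PySem.Int.bxor x2 (x2 >>> 4)
    let x4 := PySem.Int.bxor x3 (x3 >>> 2)
    let x5 := PySem.Int.bxor x4 (x4 >>> 1)
    PySem.Int.bor (CurVal <<< 1) (PySem.Int.band x5 1)

-- ===== PRECONDITION & SPEC =====
def Spec_PRNG32 (CurVal : Int) (Seed : Int) (Poly : Int) (out : Int) : Prop := out = PRNG32_alt CurVal Seed Poly
instance (CurVal : Int) (Seed : Int) (Poly : Int) (out : Int) : Decidable (Spec_PRNG32 CurVal Seed Poly out) := by unfold Spec_PRNG32; infer_instance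

-- ===== CLAIM (what is proved, stated in full; the proofs are below) =====
def Claim_equal_PRNG32 : Prop := ∀ (CurVal : Int) (Seed : Int) (Poly : Int), Dom_PRNG32 CurVal Seed Poly → Spec_PRNG32 CurVal Seed Poly (PRNG32 CurVal Seed Poly)

-- ===== LEMMAS AND PROOFS =====

-- Bits of a Nat minus a sub-mask: `m - (m &&& n)` is bitwise `m && !n`.
theorem pv_tb_sub_and (k : Nat) : ∀ (m n : Nat),
    (m - (m &&& n)).testBit k = (m.testBit k && !(n.testBit k)) := by
  induction k with
  | zero =>
    intro m n
    have h2 := @Nat.and_mod_two_eq_one m n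
    have hq : m &&& n ≤ m := Nat.and_le_left
    simp only [Nat.testBit_zero]
    by_cases hm : m % 2 = 1 <;> by_cases hn : n % 2 = 1 <;> simp [hm, hn] <;> omega
  | succ k ih =>
    intro m n
    have h2 := @Nat.and_mod_two_eq_one m n
    have hd : (m &&& n) / 2 = m / 2 &&& n / 2 := Nat.and_div_two
    have hq : m &&& n ≤ m := Nat.and_le_left
    have hq2 : m / 2 &&& n / 2 ≤ m / 2 := Nat.and_le_left
    rw [Nat.testBit_add_one, Nat.testBit_add_one, Nat.testBit_add_one]
    have he : (m - (m &&& n)) / 2 = m / 2 - (m / 2 &&& n / 2) := by omega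
    rw [he]
    exact ih (m / 2) (n / 2)

theorem pv_neg_toNat (x : Nat) : (-(Int.negSucc x) - 1).toNat = x := by simp [Int.negSucc_eq]
theorem pv_negSucc_form (x : Nat) : -(↑x : Int) - 1 = Int.negSucc x := by rw [Int.negSucc_eq]; ring

-- Python `&` is bitwise on two's-complement bits
theorem pv_band_testBit (a b : Int) (k : Nat) :
    (PySem.Int.band a b).testBit k = (a.testBit k && b.testBit k) := by
  cases a with
  | ofNat m =>
    cases b with
    | ofNat n =>
      rw [PySem.Int.band]
      rw [if_pos (by exact Int.natCast_nonneg m), if_pos (by exact Int.natCast_nonneg n)]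
      show (Int.ofNat _).testBit k = _
      simp only [Int.testBit, Nat.testBit_and]
      rfl
    | negSucc n =>
      rw [PySem.Int.band]
      rw [if_pos (by exact Int.natCast_nonneg m), if_neg (by exact Int.not_le.mpr (Int.negSucc_lt_zero n))]
      rw [pv_neg_toNat]
      show (Int.ofNat _).testBit k = _
      simp only [Int.testBit]
      rw [show (Int.ofNat m).toNat = m from rfl]
      rw [pv_tb_sub_and]
  | negSucc m =>
    cases b with
    | ofNat n =>
      rw [PySem.Int.band]
      rw [if_neg (by exact Int.not_le.mpr (Int.negSucc_lt_zero m)), if_pos (by exact Int.natCast_nonneg n)]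
      rw [pv_neg_toNat]
      show (Int.ofNat _).testBit k = _
      simp only [Int.testBit]
      rw [show (Int.ofNat n).toNat = n from rfl]
      rw [pv_tb_sub_and]
      exact Bool.and_comm _ _
    | negSucc n =>
      rw [PySem.Int.band]
      rw [if_neg (by exact Int.not_le.mpr (Int.negSucc_lt_zero m)), if_neg (by exact Int.not_le.mpr (Int.negSucc_lt_zero n))]
      rw [pv_neg_toNat, pv_neg_toNat]
      rw [show -(↑(m ||| n) : Int) - 1 = Int.negSucc (m ||| n) from pv_negSucc_form _]
      simp [Int.testBit, Nat.testBit_or]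

-- Python `^` is bitwise on two's-complement bits
theorem pv_bxor_testBit (a b : Int) (k : Nat) :
    (PySem.Int.bxor a b).testBit k = xor (a.testBit k) (b.testBit k) := by
  cases a with
  | ofNat m =>
    cases b with
    | ofNat n =>
      rw [PySem.Int.bxor]
      rw [if_pos (by exact Int.natCast_nonneg m), if_pos (by exact Int.natCast_nonneg n)]
      show (Int.ofNat _).testBit k = _
      simp only [Int.testBit, Nat.testBit_xor]
      rfl
    | negSucc n =>
      rw [PySem.Int.bxor]
      rw [if_pos (by exact Int.natCast_nonneg m), if_neg (by exact Int.not_le.mpr (Int.negSucc_lt_zero n))]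
      rw [pv_neg_toNat]
      rw [show (Int.ofNat m).toNat = m from rfl]
      rw [pv_negSucc_form]
      simp [Int.testBit, Nat.testBit_xor]
  | negSucc m =>
    cases b with
    | ofNat n =>
      rw [PySem.Int.bxor]
      rw [if_neg (by exact Int.not_le.mpr (Int.negSucc_lt_zero m)), if_pos (by exact Int.natCast_nonneg n)]
      rw [pv_neg_toNat]
      rw [show (Int.ofNat n).toNat = n from rfl]
      rw [pv_negSucc_form]
      simp [Int.testBit, Nat.testBit_xor]
    | negSucc n =>
      rw [PySem.Int.bxor]
      rw [if_neg (by exact Int.not_le.mpr (Int.negSucc_lt_zero m)), if_neg (by exact Int.not_le.mpr (Int.negSucc_lt_zero n))]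
      rw [pv_neg_toNat, pv_neg_toNat]
      show (Int.ofNat _).testBit k = _
      simp only [Int.testBit, Nat.testBit_xor]
      cases m.testBit k <;> cases n.testBit k <;> rfl

-- Python `z & 1` extracts bit 0
theorem pv_band_one (z : Int) : PySem.Int.band z 1 = if z.testBit 0 then 1 else 0 := by
  cases z with
  | ofNat m =>
    rw [PySem.Int.band]
    rw [if_pos (by exact Int.natCast_nonneg m), if_pos (by norm_num)]
    rw [show ((1:Int).toNat) = 1 from rfl, show (Int.ofNat m).toNat = m from rfl]
    rw [Nat.and_one_is_mod]
    simp only [Int.testBit, Nat.testBit_zero]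
    by_cases h : m % 2 = 1
    · simp [h]
    · have : m % 2 = 0 := by omega
      simp [this]
  | negSucc m =>
    rw [PySem.Int.band]
    rw [if_neg (by exact Int.not_le.mpr (Int.negSucc_lt_zero m)), if_pos (by norm_num)]
    rw [pv_neg_toNat, show ((1:Int).toNat) = 1 from rfl]
    rw [Nat.one_and_eq_mod_two]
    simp only [Int.testBit, Nat.testBit_zero]
    by_cases h : m % 2 = 1
    · simp [h]
    · have : m % 2 = 0 := by omega
      simp [this]

-- right shift by a Nat moves two's-complement bits down
theorem pv_tb_shift (z : Int) (s i : Nat) : (z >>> s).testBit i = z.testBit (i + s) := by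
  cases z with
  | ofNat m =>
    show Nat.testBit (m >>> s) i = Nat.testBit m (i + s)
    rw [Nat.testBit_shiftRight, Nat.add_comm]
  | negSucc m =>
    show (!Nat.testBit (m >>> s) i) = (!Nat.testBit m (i + s))
    rw [Nat.testBit_shiftRight, Nat.add_comm]

-- right shift by an Int cast from a Nat is the Nat shift
theorem pv_tb_shift' (z : Int) (s i : Nat) : (z >>> (s : Int)).testBit i = z.testBit (i + s) := by
  rw [Int.shiftRight_natCast_right, pv_tb_shift]

theorem pv_mask_testBit (i : Nat) : (4294967295 : Int).testBit i = decide (i < 32) := by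
  have h : (4294967295 : Int) = Int.ofNat (2 ^ 32 - 1) := rfl
  rw [h]
  show Nat.testBit (2 ^ 32 - 1) i = decide (i < 32)
  exact Nat.testBit_two_pow_sub_one 32 i

-- one step of A's loop, on a 0/1-valued accumulator
theorem pv_astep (C P : Int) (acc : Bool) (i : Nat) :
    (if PySem.Int.band (P >>> (i : Int)) 1 = 1 then
        PySem.Int.bxor (if acc then 1 else 0) (PySem.Int.band (C >>> (i : Int)) 1)
      else (if acc then (1:Int) else 0))
      = if xor acc (C.testBit i && P.testBit i) then 1 else 0 := by
  rw [Int.shiftRight_natCast_right, Int.shiftRight_natCast_right, pv_band_one, pv_band_one,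
    pv_tb_shift, pv_tb_shift]
  simp only [Nat.zero_add]
  cases hc : C.testBit i <;> cases hp : P.testBit i <;> cases acc <;> first | (simp; decide) | simp

-- A's whole fold, for any index list, on a 0/1-valued accumulator
theorem pv_afold (C P : Int) (l : List Int) (acc : Bool) :
    l.foldl (fun f i =>
        if PySem.Int.band (P >>> (↑i.toNat : Int)) 1 = 1 then
          PySem.Int.bxor f (PySem.Int.band (C >>> (↑i.toNat : Int)) 1)
        else f) (if acc then 1 else 0)
      = if l.foldl (fun b i => xor b (C.testBit i.toNat && P.testBit i.toNat)) acc then 1 else 0 := by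
  induction l generalizing acc with
  | nil => rfl
  | cons x xs ih =>
    simp only [List.foldl_cons]
    rw [pv_astep C P acc x.toNat]
    exact ih _


def pvXorList (l : List Bool) : Bool := l.foldr xor false

theorem pvXorList_perm {l1 l2 : List Bool} (h : l1.Perm l2) : pvXorList l1 = pvXorList l2 := by
  induction h with
  | nil => rfl
  | cons x _ ih => simp only [pvXorList, List.foldr_cons] at *; rw [ih]
  | swap x y l =>
    simp only [pvXorList, List.foldr_cons]
    cases x <;> cases y <;> simp
  | trans _ _ ih1 ih2 => exact ih1.trans ih2

theorem pv_foldl_xor {β : Type} (g : β → Bool) (l : List β) (acc : Bool) :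
    l.foldl (fun b x => xor b (g x)) acc = xor acc (pvXorList (l.map g)) := by
  induction l generalizing acc with
  | nil => simp [pvXorList]
  | cons x xs ih =>
    rw [List.foldl_cons, ih]
    simp only [pvXorList, List.map_cons, List.foldr_cons]
    rw [Bool.xor_assoc]

-- B's xor-shift cascade reads bit 0 as the parity of bits 0–31 of y
set_option maxHeartbeats 1000000 in
theorem pv_chain5 (y : Int) :
    PySem.Int.band (PySem.Int.bxor (PySem.Int.bxor (PySem.Int.bxor (PySem.Int.bxor (PySem.Int.bxor (y) ((y) >>> (16:Int))) ((PySem.Int.bxor (y) ((y) >>> (16:Int))) >>> (8:Int))) ((PySem.Int.bxor (PySem.Int.bxor (y) ((y) >>> (16:Int))) ((PySem.Int.bxor (y) ((y) >>> (16:Int))) >>> (8:Int))) >>> (4:Int))) ((PySem.Int.bxor (PySem.Int.bxor (PySem.Int.bxor (y) ((y) >>> (16:Int))) ((PySem.Int.bxor (y) ((y) >>> (16:Int))) >>> (8:Int))) ((PySem.Int.bxor (PySem.Int.bxor (y) ((y) >>> (16:Int))) ((PySem.Int.bxor (y) ((y) >>> (16:Int))) >>> (8:Int))) >>> (4:Int)))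 >>> (2:Int))) ((PySem.Int.bxor (PySem.Int.bxor (PySem.Int.bxor (PySem.Int.bxor (y) ((y) >>> (16:Int))) ((PySem.Int.bxor (y) ((y) >>> (16:Int))) >>> (8:Int))) ((PySem.Int.bxor (PySem.Int.bxor (y) ((y) >>> (16:Int))) ((PySem.Int.bxor (y) ((y) >>> (16:Int))) >>> (8:Int))) >>> (4:Int))) ((PySem.Int.bxor (PySem.Int.bxor (PySem.Int.bxor (y) ((y) >>> (16:Int))) ((PySem.Int.bxor (y) ((y) >>> (16:Int))) >>> (8:Int))) ((PySem.Int.bxor (PySem.Int.bxor (y) ((y) >>> (16:Int))) ((PySem.Int.bxor (y) ((y) >>> (16:Int))) >>> (8:Int))) >>> (4:Int))) >>> (2:Int))) >>> (1:Int))) 1 = if pvXorList (([0,16,8,24,4,20,12,28,2,18,10,26,6,22,14,30,1,17,9,25,5,21,13,29,3,19,11,27,7,23,15,31] : List Nat).map (fun n => y.testBit n)) then (1:Int) else 0 := by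
  rw [pv_band_one]
  have hc : (PySem.Int.bxor (PySem.Int.bxor (PySem.Int.bxor (PySem.Int.bxor (PySem.Int.bxor (y) ((y) >>> (16:Int))) ((PySem.Int.bxor (y) ((y) >>> (16:Int))) >>> (8:Int))) ((PySem.Int.bxor (PySem.Int.bxor (y) ((y) >>> (16:Int))) ((PySem.Int.bxor (y) ((y) >>> (16:Int))) >>> (8:Int))) >>> (4:Int))) ((PySem.Int.bxor (PySem.Int.bxor (PySem.Int.bxor (y) ((y) >>> (16:Int))) ((PySem.Int.bxor (y) ((y) >>> (16:Int))) >>> (8:Int))) ((PySem.Int.bxor (PySem.Int.bxor (y) ((y) >>> (16:Int))) ((PySem.Int.bxor (y) ((y) >>> (16:Int))) >>> (8:Int))) >>> (4:Int))) >>> (2:Int))) ((PySem.Int.bxor (PySem.Int.bxor (PySem.Int.bxor (PySem.Int.bxor (y) ((y) >>> (16:Int))) ((PySem.Int.bxor (y) ((y) >>> (16:Int))) >>> (8:Int))) ((PySem.Int.bxor (PySem.Int.bxor (y) ((y) >>> (16:Int))) ((PySem.Int.bxor (y) ((y) >>> (16:Int))) >>> (8:Int))) >>> (4:Int))) ((PySem.Int.bxor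 (PySem.Int.bxor (PySem.Int.bxor (y) ((y) >>> (16:Int))) ((PySem.Int.bxor (y) ((y) >>> (16:Int))) >>> (8:Int))) ((PySem.Int.bxor (PySem.Int.bxor (y) ((y) >>> (16:Int))) ((PySem.Int.bxor (y) ((y) >>> (16:Int))) >>> (8:Int))) >>> (4:Int))) >>> (2:Int))) >>> (1:Int))).testBit 0
      = pvXorList (([0,16,8,24,4,20,12,28,2,18,10,26,6,22,14,30,1,17,9,25,5,21,13,29,3,19,11,27,7,23,15,31] : List Nat).map (fun n => y.testBit n)) := by
    simp only [show ((16:Int)) = (((16:Nat)):Int) from rfl, show ((8:Int)) = (((8:Nat)):Int) from rfl,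
      show ((4:Int)) = (((4:Nat)):Int) from rfl, show ((2:Int)) = (((2:Nat)):Int) from rfl,
      show ((1:Int)) = (((1:Nat)):Int) from rfl]
    simp only [pv_bxor_testBit, pv_tb_shift', Nat.reduceAdd, Nat.zero_add]
    simp only [pvXorList, List.map_cons, List.map_nil, List.foldr_cons, List.foldr_nil,
      Bool.xor_false, Bool.xor_assoc]
  rw [hc]

-- ===== VERDICT (by name: the statement is the Claim_ definition above) =====
set_option maxHeartbeats 1000000 in
theorem PRNG32_spec : Claim_equal_PRNG32 := by
  intro C S P _
  unfold Spec_PRNG32 PRNG32 PRNG32_alt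
  by_cases h : C = 0
  · simp [h]
  · dsimp only
    rw [if_neg h, if_neg h]
    refine congrArg (PySem.Int.bor (C <<< 1)) ?_
    rw [pv_chain5 (PySem.Int.band (PySem.Int.band C P) 4294967295)]
    have hA := pv_afold C P (PySem.List.pyRange 0 32 1) false
    rw [show (if (false:Bool) then (1:Int) else 0) = 0 from rfl] at hA
    rw [hA, pv_foldl_xor]
    simp only [Bool.false_xor]
    refine congrArg (fun b : Bool => if b then (1:Int) else 0) ?_
    have hmem : ∀ n ∈ ([0,16,8,24,4,20,12,28,2,18,10,26,6,22,14,30,1,17,9,25,5,21,13,29,3,19,11,27,7,23,15,31] : List Nat),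
        (fun n => (PySem.Int.band (PySem.Int.band C P) 4294967295).testBit n) n
          = (fun n => C.testBit n && P.testBit n) n := by
      intro n hn
      have hlt : n < 32 := by
        have hall : ∀ m ∈ ([0,16,8,24,4,20,12,28,2,18,10,26,6,22,14,30,1,17,9,25,5,21,13,29,3,19,11,27,7,23,15,31] : List Nat), m < 32 := by decide
        exact hall n hn
      simp only [pv_band_testBit, pv_mask_testBit, hlt, decide_true, Bool.and_true]
    rw [List.map_congr_left hmem]
    have hmap : (PySem.List.pyRange 0 32 1).map
          (fun i => C.testBit i.toNat && P.testBit i.toNat)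
        = (([0,1,2,3,4,5,6,7,8,9,10,11,12,13,14,15,16,17,18,19,20,21,22,23,24,25,26,27,28,29,30,31] : List Nat)).map (fun n => C.testBit n && P.testBit n) := by
      rw [show PySem.List.pyRange 0 32 1 = ([0,1,2,3,4,5,6,7,8,9,10,11,12,13,14,15,16,17,18,19,20,21,22,23,24,25,26,27,28,29,30,31] : List Int) from by decide]
      rfl
    rw [hmap]
    exact pvXorList_perm (List.Perm.map _ (by decide : ([0,1,2,3,4,5,6,7,8,9,10,11,12,13,14,15,16,17,18,19,20,21,22,23,24,25,26,27,28,29,30,31] : List Nat).Perm [0,16,8,24,4,20,12,28,2,18,10,26,6,22,14,30,1,17,9,25,5,21,13,29,3,19,11,27,7,23,15,31]))
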